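-- pv_equiv track=rewrite | github.com/luismunozse/AED | Trabajos Practicos/TP02/TP02.py | validar_palabra
-- ===== SOURCE A (Python) =====
-- def validar_palabra(direccion):
--     esnumero = False
--     for char in direccion:
--         if char.isdigit():
--             esnumero = True
--         elif char == ' ' or char == '.':
--             if esnumero:
--                 return True
--             continue
--     return False
-- ===== SOURCE B (Python) =====
-- def validar_palabra(direccion):
--     for i, ch in enumerate(direccion):
--         if ch.isdigit():
--             rest = direccion[i+1:]
--             return (' ' in rest) or ('.' in rest)
--     return False
-- ===== Notes on version B (the rewrite author's own statement) =====
-- stated objective: simpler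
-- what changed: Replaces A's sticky-flag single pass with a find-first-digit then membership-test decomposition: once the first digit is located, the answer is just whether a space or period occurs in the remainder.
import Mathlib
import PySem

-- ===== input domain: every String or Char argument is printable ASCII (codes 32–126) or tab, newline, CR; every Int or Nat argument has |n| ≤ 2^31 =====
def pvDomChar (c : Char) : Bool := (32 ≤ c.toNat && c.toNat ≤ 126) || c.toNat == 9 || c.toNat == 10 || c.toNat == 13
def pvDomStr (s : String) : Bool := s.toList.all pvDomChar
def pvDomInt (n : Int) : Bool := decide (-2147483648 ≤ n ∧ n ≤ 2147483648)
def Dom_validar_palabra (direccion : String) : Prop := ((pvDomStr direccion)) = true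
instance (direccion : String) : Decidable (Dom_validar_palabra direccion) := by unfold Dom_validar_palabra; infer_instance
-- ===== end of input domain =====

-- B replaces A's sticky-flag single pass by find-first-digit then membership tests on the rest (simpler decomposition).

-- ===== PORT A =====
-- A's loop: flag esnumero, digit sets it, space/period returns True if set.
def pvLoopA : List Char → Bool → Bool
  | [], _ => false
  | c :: cs, esnumero =>
    if PySem.Chars.isdigit c then pvLoopA cs true
    else if c == ' ' || c == '.' then
      (if esnumero then true else pvLoopA cs esnumero)
    else pvLoopA cs esnumero

def validar_palabra (direccion : String) : Bool := pvLoopA direccion.toList false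

-- ===== PORT B =====
-- B: drop chars up to the first digit; answer = ' ' or '.' occurs after it.
def validar_palabra_alt (direccion : String) : Bool :=
  match direccion.toList.dropWhile (fun c => !PySem.Chars.isdigit c) with
  | [] => false
  | _ :: rest => rest.contains ' ' || rest.contains '.'

-- ===== PRECONDITION & SPEC =====
def Spec_validar_palabra (direccion : String) (out : Bool) : Prop := out = validar_palabra_alt direccion
instance (direccion : String) (out : Bool) : Decidable (Spec_validar_palabra direccion out) := by unfold Spec_validar_palabra; infer_instance

-- ===== CLAIM (what is proved, stated in full; the proofs are below) =====
def Claim_equal_validar_palabra : Prop := ∀ (direccion : String), Dom_validar_palabra direccion → Spec_validar_palabra direccion (validar_palabra direccion)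

-- ===== LEMMAS AND PROOFS =====

lemma pvLoopA_true (cs : List Char) : pvLoopA cs true = (cs.contains ' ' || cs.contains '.') := by
  induction cs with
  | nil => rfl
  | cons c cs ih =>
    by_cases hd : PySem.Chars.isdigit c = true
    · have h1 : ' ' ≠ c := fun h => absurd hd (by rw [← h]; decide)
      have h2 : '.' ≠ c := fun h => absurd hd (by rw [← h]; decide)
      simp [pvLoopA, hd, ih, h1, h2]
    · have hd' := Bool.eq_false_iff.mpr hd
      by_cases hs : (c == ' ' || c == '.') = true
      · rcases Bool.or_eq_true_iff.mp hs with h | h <;> simp at h <;> subst h <;>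
          simp [pvLoopA, hd']
      · simp only [Bool.or_eq_true, beq_iff_eq, not_or] at hs
        have h1 : ' ' ≠ c := fun h => hs.1 h.symm
        have h2 : '.' ≠ c := fun h => hs.2 h.symm
        have hs' : (c == ' ' || c == '.') = false := by
          simp [Ne.symm h1, Ne.symm h2]
        simp [pvLoopA, hd', hs', ih, h1, h2]

lemma pvLoopA_false (cs : List Char) :
    pvLoopA cs false =
      (match cs.dropWhile (fun c => !PySem.Chars.isdigit c) with
       | [] => false
       | _ :: rest => rest.contains ' ' || rest.contains '.') := by
  induction cs with
  | nil => rfl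
  | cons c cs ih =>
    by_cases hd : PySem.Chars.isdigit c = true
    · simp [pvLoopA, hd, pvLoopA_true]
    · have hd' := Bool.eq_false_iff.mpr hd
      by_cases hs : (c == ' ' || c == '.') = true
      · simp [pvLoopA, hd', hs, ih]
      · simp [pvLoopA, hd', Bool.eq_false_iff.mpr hs, ih]

-- ===== VERDICT (by name: the statement is the Claim_ definition above) =====
theorem validar_palabra_spec : Claim_equal_validar_palabra := by
  intro d _
  unfold Spec_validar_palabra validar_palabra validar_palabra_alt
  exact pvLoopA_false d.toList
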